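-- pv_equiv track=rewrite | github.com/lynceuslq/NextStepPredict | protdesignmodules.py | mutant_loc
-- ===== SOURCE A (Python) =====
-- def mutant_loc(seq1, seq2):
--     a=list(seq1)
--     b=list(seq2)
--     diflist=[]
--     if len(a) == len(b):
--         for i in range(len(a)):
--             if a[i] != b[i]:
--                 diflist.append(i+1)
--
--         return diflist, [seq1[x-1] for x in diflist],  [seq2[x-1] for x in diflist]
-- ===== SOURCE B (Python) =====
-- def mutant_loc(seq1, seq2):
--     if len(seq1) != len(seq2):
--         return None
--
--     def rec(a, b, off):
--         # divide and conquer: an equal segment is pruned wholesale by one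
--         # string comparison; otherwise split in half and concatenate results
--         if a == b:
--             return [], [], []
--         if len(a) <= 1:
--             return [off + 1], [a], [b]
--         m = len(a) // 2
--         p1, x1, y1 = rec(a[:m], b[:m], off)
--         p2, x2, y2 = rec(a[m:], b[m:], off + m)
--         return p1 + p2, x1 + x2, y1 + y2
--
--     return rec(seq1, seq2, 0)
-- ===== Notes on version B (the rewrite author's own statement) =====
-- stated objective: alternative
-- what changed: Replaces A's index loop plus two re-indexing comprehensions by a recursive divide-and-conquer that prunes any segment where the two halves are equal with a single string comparison and concatenates the sub-results.
-- outside the precondition, e.g. on mutant_loc('a', 'bc'): A returns None, B returns None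
import Mathlib
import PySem

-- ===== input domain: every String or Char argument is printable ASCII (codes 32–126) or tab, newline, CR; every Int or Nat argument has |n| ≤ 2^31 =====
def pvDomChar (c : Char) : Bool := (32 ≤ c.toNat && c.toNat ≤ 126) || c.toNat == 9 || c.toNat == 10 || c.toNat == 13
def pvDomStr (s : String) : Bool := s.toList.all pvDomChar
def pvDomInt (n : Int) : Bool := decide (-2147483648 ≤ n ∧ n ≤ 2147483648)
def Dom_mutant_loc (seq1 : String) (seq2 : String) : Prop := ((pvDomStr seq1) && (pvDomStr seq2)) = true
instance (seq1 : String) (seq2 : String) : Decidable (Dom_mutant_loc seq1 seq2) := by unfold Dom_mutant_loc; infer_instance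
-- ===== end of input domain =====

-- B replaces A's index loop + two re-indexing comprehensions by a recursive divide-and-conquer
-- that prunes equal segments with one comparison (objective: alternative algorithm, same results).

-- ===== PORT A =====
-- Literal port of A: build a, b as char lists, one index loop over range(len(a)) collecting i+1
-- where a[i] != b[i] (indices are always in range there, so getD is exact), then two comprehensions
-- re-indexing seq1/seq2 at x-1. When the lengths differ Python returns None (excluded by Pre_);
-- the port returns ([], [], []) there.
def mutant_loc (seq1 : String) (seq2 : String) : List Int × List String × List String :=
  let a := seq1.toList
  let b := seq2.toList
  if a.length = b.length then
    let diflist : List Int :=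
      (List.range a.length).foldl
        (fun acc i => if a.getD i ' ' ≠ b.getD i ' ' then acc ++ [((i : Int) + 1)] else acc) []
    (diflist,
     diflist.map (fun x => String.ofList [(PySem.Str.pyGet? seq1 (x - 1)).getD ' ']),
     diflist.map (fun x => String.ofList [(PySem.Str.pyGet? seq2 (x - 1)).getD ' ']))
  else ([], [], [])

-- ===== PORT B =====
-- the inner rec of Source B: equal segments return empty results, a differing segment of length ≤ 1
-- is a single mismatch, otherwise split at the midpoint (len // 2 on a nonnegative length is
-- exactly Python's //) and concatenate the sub-results componentwise.  fuel (= the initial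
-- length, only a structural-termination guard: it is never exhausted, since each split strictly
-- shrinks the segment) bounds the recursion depth.
def pvRec (fuel : Nat) (a b : List Char) (off : Int) : List Int × List String × List String :=
  if a = b then ([], [], [])
  else if a.length ≤ 1 then ([off + 1], [String.ofList a], [String.ofList b])
  else match fuel with
    | 0 => ([], [], [])
    | fuel' + 1 =>
      let m := a.length / 2
      let r1 := pvRec fuel' (a.take m) (b.take m) off
      let r2 := pvRec fuel' (a.drop m) (b.drop m) (off + (m : Int))
      (r1.1 ++ r2.1, r1.2.1 ++ r2.2.1, r1.2.2 ++ r2.2.2)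

-- length guard of Source B (returns None, excluded by Pre_; the port returns ([], [], []) there)
def mutant_loc_alt (seq1 : String) (seq2 : String) : List Int × List String × List String :=
  if seq1.toList.length ≠ seq2.toList.length then ([], [], [])
  else pvRec seq1.toList.length seq1.toList seq2.toList 0

-- ===== PRECONDITION & SPEC =====
-- Pre_ excludes exactly the unequal-length inputs, on which A falls off the if and returns None
-- (no value of the declared tuple type); B returns None there as well.
def Pre_mutant_loc (seq1 : String) (seq2 : String) : Prop :=
  PySem.Str.len seq1 = PySem.Str.len seq2
-- e.g. ("GATTACA", "GATTAGA") is admitted; a pair of unequal lengths is excluded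
instance (seq1 : String) (seq2 : String) : Decidable (Pre_mutant_loc seq1 seq2) := by
  unfold Pre_mutant_loc; infer_instance

def pvWitness_mutant_loc : String × String := ("abc", "abd")

def Spec_mutant_loc (seq1 : String) (seq2 : String) (out : List Int × List String × List String) : Prop := out = mutant_loc_alt seq1 seq2
instance (seq1 : String) (seq2 : String) (out : List Int × List String × List String) : Decidable (Spec_mutant_loc seq1 seq2 out) := by unfold Spec_mutant_loc; infer_instance

-- ===== CLAIM (what is proved, stated in full; the proofs are below) =====
def Claim_equal_mutant_loc : Prop := ∀ (seq1 : String) (seq2 : String), Dom_mutant_loc seq1 seq2 → Pre_mutant_loc seq1 seq2 → Spec_mutant_loc seq1 seq2 (mutant_loc seq1 seq2)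


-- ===== LEMMAS AND PROOFS =====

-- the differing indices (0-based), the common characterisation of both programs
def pvIdx (a b : List Char) : List Nat :=
  (List.range a.length).filter (fun i => a.getD i ' ' ≠ b.getD i ' ')

lemma pvIdx_self (a : List Char) : pvIdx a a = [] := by
  simp [pvIdx]

lemma pvIdx_split (a b : List Char) (m : Nat) (hm : m ≤ a.length) :
    pvIdx a b = pvIdx (a.take m) (b.take m)
      ++ (pvIdx (a.drop m) (b.drop m)).map (fun i => m + i) := by
  unfold pvIdx
  rw [show List.range a.length
        = List.range m ++ (List.range (a.length - m)).map (fun i => m + i) from by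
      rw [← List.range_add]; congr 1; omega]
  rw [List.filter_append, List.filter_map]
  congr 1
  · rw [List.length_take, Nat.min_eq_left hm]
    apply List.filter_congr
    intro i hi
    have hi' : i < m := List.mem_range.mp hi
    simp [List.getD_eq_getElem?_getD, hi']
  · rw [List.length_drop]
    congr 1
    apply List.filter_congr
    intro i _
    simp [Function.comp, List.getD_eq_getElem?_getD, List.getElem?_drop]

-- elements of pvIdx are in range
lemma pvIdx_lt (a b : List Char) {i : Nat} (hi : i ∈ pvIdx a b) : i < a.length := by
  have := List.mem_filter.mp hi
  exact List.mem_range.mp this.1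

-- characterisation of Source B's rec in terms of pvIdx
lemma pvRec_eq (fuel : Nat) : ∀ (a b : List Char) (off : Int),
    a.length = b.length → a.length ≤ fuel + 1 →
    pvRec fuel a b off =
      ((pvIdx a b).map (fun i : Nat => off + (i : Int) + 1),
       (pvIdx a b).map (fun i => String.ofList [a.getD i ' ']),
       (pvIdx a b).map (fun i => String.ofList [b.getD i ' '])) := by
  induction fuel with
  | zero =>
    intro a b off h hf
    match a, b, h with
    | [], [], _ => simp [pvRec, pvIdx_self]
    | [x], [y], _ =>
      by_cases hxy : x = y
      · subst hxy; simp [pvRec, pvIdx_self]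
      · have hne : ¬ ([x] = [y]) := by simp [hxy]
        simp [pvRec, hne, pvIdx, hxy]
    | _ :: _ :: _, _, _ => simp at hf
  | succ fuel ih =>
    intro a b off h hf
    by_cases hab : a = b
    · subst hab; simp [pvRec, pvIdx_self]
    · by_cases hlen : a.length ≤ 1
      · match a, b, h with
        | [], [], _ => exact absurd rfl hab
        | [x], [y], _ =>
          have hxy : x ≠ y := fun hc => hab (by rw [hc])
          simp [pvRec, pvIdx, hxy]
        | _ :: _ :: _, _, _ => simp at hlen
      · rw [pvRec, if_neg hab, if_neg hlen]
        have hge : 2 ≤ a.length := by omega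
        set m := a.length / 2 with hm_def
        have hm : m ≤ a.length := Nat.div_le_self _ _
        have hm1 : 1 ≤ m := by omega
        have htl : (List.take m a).length = (List.take m b).length := by simp [h]
        have hdl : (List.drop m a).length = (List.drop m b).length := by simp [h]
        have hft : (List.take m a).length ≤ fuel + 1 := by
          simp only [List.length_take]; omega
        have hfd : (List.drop m a).length ≤ fuel + 1 := by
          simp only [List.length_drop]; omega
        rw [pvIdx_split a b m hm]
        simp only [ih _ _ off htl hft, ih _ _ (off + (m : Int)) hdl hfd,
          List.map_append, List.map_map, Prod.mk.injEq]
        refine ⟨?_, ?_, ?_⟩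
        · congr 1
          apply List.map_congr_left; intro i _
          simp only [Function.comp_def]; push_cast; ring
        · congr 1
          · apply List.map_congr_left; intro i hi
            have hi' : i < m := by
              have := pvIdx_lt _ _ hi
              rwa [List.length_take, Nat.min_eq_left hm] at this
            simp [List.getD_eq_getElem?_getD, hi']
          · apply List.map_congr_left; intro i _
            simp [List.getD_eq_getElem?_getD, List.getElem?_drop]
        · congr 1
          · apply List.map_congr_left; intro i hi
            have hi' : i < m := by
              have := pvIdx_lt _ _ hi
              rwa [List.length_take, Nat.min_eq_left hm] at this
            simp [List.getD_eq_getElem?_getD, hi']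
          · apply List.map_congr_left; intro i _
            simp [List.getD_eq_getElem?_getD, List.getElem?_drop]

-- A's loop produces exactly the 1-based pvIdx positions
lemma pvFold_eq (a b : List Char) :
    (List.range a.length).foldl
        (fun acc i => if a.getD i ' ' ≠ b.getD i ' ' then acc ++ [((i : Int) + 1)] else acc) []
      = (pvIdx a b).map (fun i : Nat => (i : Int) + 1) := by
  simpa [pvIdx] using
    PySem.List.foldl_append_if (l := List.range a.length)
      (p := fun i => a.getD i ' ' ≠ b.getD i ' ') (f := fun i => ((i : Int) + 1)) (acc := [])

-- A's re-indexing seq[x-1] at x = i+1 reads the i-th character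
lemma pvChar_eq (s : String) (i : Nat) :
    (PySem.Str.pyGet? s (((i : Int) + 1) - 1)).getD ' ' = s.toList.getD i ' ' := by
  have : ((i : Int) + 1) - 1 = (i : Int) := by ring
  rw [this, PySem.Str.pyGet?_natCast]
  simp [List.getD_eq_getElem?_getD]

-- ===== VERDICT (by name: the statement is the Claim_ definition above) =====
theorem mutant_loc_spec : Claim_equal_mutant_loc := by
  intro seq1 seq2 _ hpre
  have h : seq1.toList.length = seq2.toList.length := by
    have := hpre; simp only [Pre_mutant_loc, PySem.Str.len_eq] at this; exact_mod_cast this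
  unfold Spec_mutant_loc
  simp only [mutant_loc, mutant_loc_alt]
  rw [if_pos h, if_neg (by simp [h]), pvFold_eq, pvRec_eq seq1.toList.length seq1.toList seq2.toList 0 h (by omega), List.map_map, List.map_map]
  simp only [Prod.mk.injEq]
  refine ⟨?_, ?_, ?_⟩
  · apply List.map_congr_left; intro i _; ring
  · apply List.map_congr_left; intro i _
    simp only [Function.comp_def, pvChar_eq]
  · apply List.map_congr_left; intro i _
    simp only [Function.comp_def, pvChar_eq]
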